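-- pv_equiv track=rewrite | github.com/sgt-ppepper/Groke-Lapa | scripts/examples/create_test_set.py | get_topic_content
-- ===== SOURCE A (Python) =====
-- def get_topic_content(document: str) -> str:
--     """Extract topic content from document."""
--     # Document format: "TOPIC: ...\nSUBTOPICS: ...\nSUMMARY: ...\nSECTION: ...\nTEXT: ..."
--     parts = {}
--     current_key = None
--     current_value = []
--
--     for line in document.split("\n"):
--         if ":" in line and line.split(":")[0].strip() in ["TOPIC", "SUBTOPICS", "SUMMARY", "SECTION", "TEXT"]:
--             if current_key:
--                 parts[current_key] = "\n".join(current_value).strip()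
--             current_key = line.split(":")[0].strip()
--             current_value = [line.split(":", 1)[1].strip()] if ":" in line else []
--         elif current_key:
--             current_value.append(line)
--
--     if current_key:
--         parts[current_key] = "\n".join(current_value).strip()
--
--     # Prefer SUMMARY, then TEXT, then TOPIC
--     if parts.get("SUMMARY"):
--         return parts["SUMMARY"]
--     elif parts.get("TEXT"):
--         return parts["TEXT"][:500]  # Limit length
--     elif parts.get("TOPIC"):
--         return parts["TOPIC"]
--     else:
--         return document[:500]
-- ===== SOURCE B (Python) =====
-- def get_topic_content(document: str) -> str:
--     """Extract topic content from document."""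
--     keys = ("TOPIC", "SUBTOPICS", "SUMMARY", "SECTION", "TEXT")
--
--     def is_header(line):
--         return ":" in line and line.split(":")[0].strip() in keys
--
--     lines = document.split("\n")
--     n = len(lines)
--     i = 0
--     while i < n and not is_header(lines[i]):
--         i += 1
--
--     parts = {}
--     while i < n:
--         head = lines[i]
--         j = i + 1
--         while j < n and not is_header(lines[j]):
--             j += 1
--         body = [head.split(":", 1)[1].strip()] + lines[i + 1:j]
--         parts[head.split(":")[0].strip()] = "\n".join(body).strip()
--         i = j
--
--     if parts.get("SUMMARY"):
--         return parts["SUMMARY"]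
--     if parts.get("TEXT"):
--         return parts["TEXT"][:500]
--     if parts.get("TOPIC"):
--         return parts["TOPIC"]
--     return document[:500]
-- ===== Notes on version B (the rewrite author's own statement) =====
-- stated objective: alternative
-- what changed: Replaced A's streaming fold that threads current_key/current_value state through every line by a two-level block scan: skip to the first header, then for each header scan forward to the next header and store the whole block at once.
import Mathlib
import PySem

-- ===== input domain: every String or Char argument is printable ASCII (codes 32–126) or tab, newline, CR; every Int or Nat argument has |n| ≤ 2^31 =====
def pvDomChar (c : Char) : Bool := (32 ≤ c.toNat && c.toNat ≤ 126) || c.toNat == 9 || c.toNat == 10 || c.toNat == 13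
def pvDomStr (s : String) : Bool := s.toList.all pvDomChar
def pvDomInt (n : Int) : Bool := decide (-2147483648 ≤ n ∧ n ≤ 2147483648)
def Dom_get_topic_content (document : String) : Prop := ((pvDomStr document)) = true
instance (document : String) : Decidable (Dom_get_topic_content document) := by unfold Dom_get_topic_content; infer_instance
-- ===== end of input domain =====

-- B replaces A's streaming accumulator (current_key/current_value carried through one fold) by a
-- two-level block scan: skip to the first header, then for each header take the block up to the
-- next header; objective: alternative decomposition, same cost.

-- ===== PORT A =====
def pvKeysA : List String := ["TOPIC", "SUBTOPICS", "SUMMARY", "SECTION", "TEXT"]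

-- line.split(":")[0].strip()
def aKey (line : String) : String :=
  PySem.Str.strip (((PySem.Str.split? line ":").getD []).getD 0 "")

-- ':' in line and line.split(':')[0].strip() in [...]
def aIsHeader (line : String) : Bool :=
  PySem.Str.isIn ":" line && pvKeysA.contains (aKey line)

-- line.split(":", 1)[1].strip()
def aRest (line : String) : String :=
  PySem.Str.strip (((PySem.Str.splitMax? line ":" 1).getD []).getD 1 "")

-- 'if current_key: parts[current_key] = "\n".join(current_value).strip()'
def aFlush (parts : PySem.Dict String String) (ck : Option String) (cv : List String) :
    PySem.Dict String String :=
  match ck with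
  | some k => parts.insert k (PySem.Str.strip (PySem.Str.join "\n" cv))
  | none => parts

-- the body of A's for-loop, one line
def aStep (st : PySem.Dict String String × Option String × List String) (line : String) :
    PySem.Dict String String × Option String × List String :=
  match st with
  | (parts, ck, cv) =>
    if aIsHeader line then (aFlush parts ck cv, some (aKey line), [aRest line])
    else
      match ck with
      | some k => (parts, some k, cv ++ [line])
      | none => (parts, none, cv)

def get_topic_content (document : String) : String :=
  let st := ((PySem.Str.split? document "\n").getD []).foldl aStep (PySem.Dict.empty, none, [])
  let parts := aFlush st.1 st.2.1 st.2.2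
  if parts.getD "SUMMARY" "" ≠ "" then parts.getD "SUMMARY" ""
  else if parts.getD "TEXT" "" ≠ "" then PySem.Str.slice (parts.getD "TEXT" "") none (some 500)
  else if parts.getD "TOPIC" "" ≠ "" then parts.getD "TOPIC" ""
  else PySem.Str.slice document none (some 500)

-- ===== PORT B =====
def pvKeysB : List String := ["TOPIC", "SUBTOPICS", "SUMMARY", "SECTION", "TEXT"]

def bKey (line : String) : String :=
  PySem.Str.strip (((PySem.Str.split? line ":").getD []).getD 0 "")

def bIsHeader (line : String) : Bool :=
  PySem.Str.isIn ":" line && pvKeysB.contains (bKey line)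

def bRest (line : String) : String :=
  PySem.Str.strip (((PySem.Str.splitMax? line ":" 1).getD []).getD 1 "")

-- B's outer while-loop: lines starts at a header; the inner while-scan to the next header is
-- takeWhile/dropWhile of the non-header prefix (lines[i+1:j] with j the next header index).
def bParse (parts : PySem.Dict String String) : List String → PySem.Dict String String
  | [] => parts
  | head :: rest =>
    let body := rest.takeWhile (fun l => !bIsHeader l)
    let rest' := rest.dropWhile (fun l => !bIsHeader l)
    bParse (parts.insert (bKey head)
      (PySem.Str.strip (PySem.Str.join "\n" (bRest head :: body)))) rest'
termination_by l => l.length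
decreasing_by
  simp only [List.length_cons]
  exact Nat.lt_succ_of_le (List.length_dropWhile_le _ _)

def get_topic_content_alt (document : String) : String :=
  let lines := (PySem.Str.split? document "\n").getD []
  let parts := bParse PySem.Dict.empty (lines.dropWhile (fun l => !bIsHeader l))
  if parts.getD "SUMMARY" "" ≠ "" then parts.getD "SUMMARY" ""
  else if parts.getD "TEXT" "" ≠ "" then PySem.Str.slice (parts.getD "TEXT" "") none (some 500)
  else if parts.getD "TOPIC" "" ≠ "" then parts.getD "TOPIC" ""
  else PySem.Str.slice document none (some 500)

-- ===== PRECONDITION & SPEC =====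
def Spec_get_topic_content (document : String) (out : String) : Prop := out = get_topic_content_alt document
instance (document : String) (out : String) : Decidable (Spec_get_topic_content document out) := by unfold Spec_get_topic_content; infer_instance

-- ===== CLAIM (what is proved, stated in full; the proofs are below) =====
def Claim_equal_get_topic_content : Prop := ∀ (document : String), Dom_get_topic_content document → Spec_get_topic_content document (get_topic_content document)

-- ===== LEMMAS AND PROOFS =====
theorem bIsHeader_eq : bIsHeader = aIsHeader := rfl
theorem bKey_eq : bKey = aKey := rfl
theorem bRest_eq : bRest = aRest := rfl

theorem aFlush_some (parts : PySem.Dict String String) (k : String) (cv : List String) :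
    aFlush parts (some k) cv = parts.insert k (PySem.Str.strip (PySem.Str.join "\n" cv)) := rfl

theorem aStep_header (parts : PySem.Dict String String) (ck : Option String) (cv : List String)
    (line : String) (h : aIsHeader line = true) :
    aStep (parts, ck, cv) line = (aFlush parts ck cv, some (aKey line), [aRest line]) := by
  simp [aStep, h]

theorem aStep_nonheader_some (parts : PySem.Dict String String) (k : String) (cv : List String)
    (line : String) (h : aIsHeader line = false) :
    aStep (parts, some k, cv) line = (parts, some k, cv ++ [line]) := by
  simp [aStep, h]

theorem aStep_nonheader_none (parts : PySem.Dict String String) (cv : List String)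
    (line : String) (h : aIsHeader line = false) :
    aStep (parts, none, cv) line = (parts, none, cv) := by
  simp [aStep, h]

-- A's run from an open block (current_key = some k, collected cv) equals: close the block with the
-- coming non-header lines, then block-parse the remainder.
theorem aRun_some (lines : List String) (parts : PySem.Dict String String) (k : String)
    (cv : List String) :
    aFlush (lines.foldl aStep (parts, some k, cv)).1 (lines.foldl aStep (parts, some k, cv)).2.1
        (lines.foldl aStep (parts, some k, cv)).2.2 =
      bParse (parts.insert k (PySem.Str.strip (PySem.Str.join "\n"
          (cv ++ lines.takeWhile (fun l => !aIsHeader l)))))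
        (lines.dropWhile (fun l => !aIsHeader l)) := by
  induction lines generalizing parts k cv with
  | nil => simp [aFlush, bParse]
  | cons l ls ih =>
    by_cases h : aIsHeader l = true
    · rw [List.foldl_cons, aStep_header _ _ _ _ h, aFlush_some, ih]
      rw [List.takeWhile_cons_of_neg (by simp [h]), List.dropWhile_cons_of_neg (by simp [h])]
      rw [bParse]
      simp [bIsHeader_eq, bKey_eq, bRest_eq]
    · simp only [Bool.not_eq_true] at h
      rw [List.foldl_cons, aStep_nonheader_some _ _ _ _ h, ih]
      rw [List.takeWhile_cons_of_pos (by simp [h]), List.dropWhile_cons_of_pos (by simp [h])]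
      simp

-- A's run from the initial state equals: skip to the first header, then block-parse.
theorem aRun_none (lines : List String) (parts : PySem.Dict String String) :
    aFlush (lines.foldl aStep (parts, none, [])).1 (lines.foldl aStep (parts, none, [])).2.1
        (lines.foldl aStep (parts, none, [])).2.2 =
      bParse parts (lines.dropWhile (fun l => !aIsHeader l)) := by
  induction lines generalizing parts with
  | nil => simp [aFlush, bParse]
  | cons l ls ih =>
    by_cases h : aIsHeader l = true
    · rw [List.foldl_cons, aStep_header _ _ _ _ h, aRun_some]
      rw [List.dropWhile_cons_of_neg (by simp [h])]
      rw [bParse]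
      simp [aFlush, bIsHeader_eq, bKey_eq, bRest_eq]
    · simp only [Bool.not_eq_true] at h
      rw [List.foldl_cons, aStep_nonheader_none _ _ _ h, ih,
        List.dropWhile_cons_of_pos (by simp [h])]

-- ===== VERDICT (by name: the statement is the Claim_ definition above) =====
theorem get_topic_content_spec : Claim_equal_get_topic_content := by
  intro document _
  unfold Spec_get_topic_content
  simp only [get_topic_content, get_topic_content_alt]
  rw [aRun_none]
  simp [bIsHeader_eq]
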